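-- pv_equiv track=rewrite | github.com/Broski-AC/FreeCodeCamp | symmetricDifference.py | symmetric_difference
-- ===== SOURCE A (Python) =====
-- def symmetric_difference(differList):
--     noMatchList = []
--     for lister in differList:
--         for item in lister:
--             if item in noMatchList:
--                 noMatchList.remove(item)
--             else:
--                 noMatchList.append(item)
--
--     return(noMatchList)
--
-- differList = [[1, 2, 5], [2, 3, 5], [3, 4, 5]]
-- ===== SOURCE B (Python) =====
-- def symmetric_difference(differList):
--     # No toggling: count every occurrence and record each value's last
--     # position in the flattened stream, then emit a value at its last
--     # occurrence exactly when its total count is odd.  A's toggling list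
--     # ends up holding the odd-count values ordered by last occurrence,
--     # so this two-stage counting scan returns the same list in O(n).
--     flat = [item for lister in differList for item in lister]
--     count = {}
--     for item in flat:
--         count[item] = count.get(item, 0) + 1
--     last = {}
--     for i, item in enumerate(flat):
--         last[item] = i
--     return [item for i, item in enumerate(flat)
--             if last[item] == i and count[item] % 2 == 1]
-- ===== Notes on version B (the rewrite author's own statement) =====
-- stated objective: faster
-- what changed: Replaces A's per-occurrence toggling of a membership list (O(n) scan and remove per item) by staged counting passes: flatten, count occurrences and last-occurrence indices in dicts, then emit odd-count values at their last occurrence.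
import Mathlib
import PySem

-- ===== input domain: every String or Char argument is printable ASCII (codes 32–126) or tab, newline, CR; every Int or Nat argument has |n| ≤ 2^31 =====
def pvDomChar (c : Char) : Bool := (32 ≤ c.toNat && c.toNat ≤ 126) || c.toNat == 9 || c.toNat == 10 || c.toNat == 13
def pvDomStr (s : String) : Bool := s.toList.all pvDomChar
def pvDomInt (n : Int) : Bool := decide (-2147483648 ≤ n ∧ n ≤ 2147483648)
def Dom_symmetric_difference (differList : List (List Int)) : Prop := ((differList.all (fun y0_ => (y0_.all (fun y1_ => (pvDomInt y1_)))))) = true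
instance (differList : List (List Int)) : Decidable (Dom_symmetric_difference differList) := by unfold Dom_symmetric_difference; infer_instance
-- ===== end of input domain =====

-- ===== PORT A =====
-- B replaces A's quadratic toggling list by staged counting passes (flatten; count; last index; emit).
def sdStepA (noMatchList : List Int) (item : Int) : List Int :=
  if noMatchList.contains item then
    (PySem.List.remove? noMatchList item).getD noMatchList
  else
    noMatchList ++ [item]

def symmetric_difference (differList : List (List Int)) : List Int :=
  let noMatchList : List Int := []
  differList.foldl (fun noMatchList lister => lister.foldl sdStepA noMatchList) noMatchList

-- ===== PORT B =====
def symmetric_difference_alt (differList : List (List Int)) : List Int :=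
  -- flat = [item for lister in differList for item in lister]
  let flat := differList.flatMap (fun lister => lister)
  -- count[item] = count.get(item, 0) + 1
  let count := flat.foldl (fun d item => d.insert item (d.getD item 0 + 1)) PySem.Dict.empty
  -- for i, item in enumerate(flat): last[item] = i
  let last := (PySem.List.enumerate flat).foldl (fun d p => d.insert p.2 p.1) PySem.Dict.empty
  -- [item for i, item in enumerate(flat) if last[item] == i and count[item] % 2 == 1]
  -- (last[item]/count[item] are plain lookups; the keys are always present, so getD is exact)
  (PySem.List.enumerate flat).filterMap (fun p =>
    if last.getD p.2 0 == p.1 && PySem.Int.mod (count.getD p.2 0) 2 == 1 then some p.2 else none)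

-- ===== PRECONDITION & SPEC =====
def Spec_symmetric_difference (differList : List (List Int)) (out : List Int) : Prop := out = symmetric_difference_alt differList
instance (differList : List (List Int)) (out : List Int) : Decidable (Spec_symmetric_difference differList out) := by unfold Spec_symmetric_difference; infer_instance

-- ===== CLAIM =====
def Claim_equal_symmetric_difference : Prop := ∀ (differList : List (List Int)), Dom_symmetric_difference differList → Spec_symmetric_difference differList (symmetric_difference differList)

-- ===== LEMMAS AND PROOFS =====

-- the elements of l, ordered by LAST occurrence
def lastOrder : List Int → List Int
  | [] => []
  | x :: xs => if x ∈ xs then lastOrder xs else x :: lastOrder xs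

-- the common specification of both programs: odd-count elements ordered by last occurrence
def specSD (flat : List Int) : List Int :=
  (lastOrder flat).filter (fun y => decide (flat.count y % 2 = 1))

theorem mem_lastOrder (l : List Int) (x : Int) : x ∈ lastOrder l ↔ x ∈ l := by
  induction l with
  | nil => simp [lastOrder]
  | cons y ys ih =>
    by_cases h : y ∈ ys
    · simp only [lastOrder, if_pos h, ih, List.mem_cons]
      constructor
      · exact Or.inr
      · rintro (rfl | hx); exact h; exact hx
    · simp [lastOrder, if_neg h, ih]

theorem nodup_lastOrder (l : List Int) : (lastOrder l).Nodup := by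
  induction l with
  | nil => simp [lastOrder]
  | cons y ys ih =>
    by_cases h : y ∈ ys
    · simpa [lastOrder, if_pos h] using ih
    · simp only [lastOrder, if_neg h, List.nodup_cons]
      exact ⟨fun hm => h ((mem_lastOrder ys y).mp hm), ih⟩

theorem lastOrder_append_singleton (l : List Int) (x : Int) :
    lastOrder (l ++ [x]) = (lastOrder l).filter (fun y => y != x) ++ [x] := by
  induction l with
  | nil => simp [lastOrder]
  | cons y ys ih =>
    by_cases hyx : y = x
    · subst hyx
      have hmem : y ∈ ys ++ [y] := by simp
      simp only [List.cons_append, lastOrder, if_pos hmem, ih]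
      by_cases h : y ∈ ys
      · simp [if_pos h]
      · simp [if_neg h]
    · have hiff : y ∈ ys ++ [x] ↔ y ∈ ys := by simp [hyx]
      by_cases h : y ∈ ys
      · simp only [List.cons_append, lastOrder, if_pos (hiff.mpr h), ih, if_pos h]
      · have : ¬ y ∈ ys ++ [x] := fun hc => h (hiff.mp hc)
        simp only [List.cons_append, lastOrder, if_neg this, ih, if_neg h]
        have : (y != x) = true := by simpa using hyx
        simp [this]

theorem count_mem_specSD (l : List Int) (x : Int) :
    x ∈ specSD l ↔ l.count x % 2 = 1 := by
  unfold specSD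
  rw [List.mem_filter, mem_lastOrder]
  constructor
  · rintro ⟨-, h⟩; simpa using h
  · intro h
    refine ⟨?_, by simpa using h⟩
    by_contra hx
    rw [List.count_eq_zero_of_not_mem hx] at h
    omega

theorem specSD_append_singleton (l : List Int) (x : Int) :
    specSD (l ++ [x]) = (specSD l).filter (fun y => y != x)
      ++ (if l.count x % 2 = 0 then [x] else []) := by
  unfold specSD
  rw [lastOrder_append_singleton, List.filter_append]
  congr 1
  · have hsame : ((lastOrder l).filter (fun y => y != x)).filter
          (fun y => decide ((l ++ [x]).count y % 2 = 1))
        = ((lastOrder l).filter (fun y => y != x)).filter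
          (fun y => decide (l.count y % 2 = 1)) := by
      apply List.filter_congr
      intro y hy
      have hyx : y ≠ x := by simpa using (List.mem_filter.mp hy).2
      have hc : (l ++ [x]).count y = l.count y := by
        simp [List.count_append, Ne.symm hyx]
      rw [hc]
    rw [hsame, List.filter_comm]
  · have hcx : (l ++ [x]).count x = l.count x + 1 := by
      simp [List.count_append]
    rcases Nat.even_or_odd (l.count x) with he | ho
    · have h0 : l.count x % 2 = 0 := Nat.even_iff.mp he
      simp [Nat.add_mod, h0]
    · have h1 : l.count x % 2 = 1 := Nat.odd_iff.mp ho
      simp [Nat.add_mod, h1]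

-- ===== A-side: the toggling fold computes specSD =====
theorem foldl_sdStepA_eq_specSD (l : List Int) : l.foldl sdStepA [] = specSD l := by
  induction l using List.reverseRecOn with
  | nil => simp [specSD, lastOrder]
  | append_singleton l x ih =>
    rw [List.foldl_append, ih]
    simp only [List.foldl_cons, List.foldl_nil]
    rw [specSD_append_singleton]
    by_cases hodd : l.count x % 2 = 1
    · have hx : x ∈ specSD l := (count_mem_specSD l x).mpr hodd
      have hcont : (specSD l).contains x = true := by simpa using hx
      unfold sdStepA
      rw [hcont, if_pos rfl, PySem.List.remove?_eq_some_erase _ x hx, Option.getD_some]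
      have hnd : (specSD l).Nodup := (nodup_lastOrder l).filter _
      rw [hnd.erase_eq_filter]
      have : l.count x % 2 ≠ 0 := by omega
      simp [this]
    · have hx : x ∉ specSD l := fun h => hodd ((count_mem_specSD l x).mp h)
      have hcont : (specSD l).contains x = false := by simpa using hx
      unfold sdStepA
      rw [hcont]
      simp only [Bool.false_eq_true, if_false]
      have heven : l.count x % 2 = 0 := by omega
      have hfil : (specSD l).filter (fun y => y != x) = specSD l := by
        apply List.filter_eq_self.mpr
        intro y hy
        simp only [bne_iff_ne, ne_eq]
        rintro rfl; exact hx hy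
      rw [hfil, if_pos heven]

-- ===== B-side: the counting passes compute specSD =====
theorem modCast_two (c : Nat) : PySem.Int.mod (c : Int) 2 = ((c % 2 : Nat) : Int) := by
  exact_mod_cast PySem.Int.mod_natCast c 2

theorem modCond (c : Nat) : (PySem.Int.mod (c : Int) 2 == 1) = decide (c % 2 = 1) := by
  rw [modCast_two]
  rcases Nat.mod_two_eq_zero_or_one c with h | h <;> simp [h]

theorem bout_eq_specSD (flat : List Int) :
    (PySem.List.enumerate flat).filterMap (fun p =>
      if ((PySem.List.enumerate flat).foldl (fun d p => d.insert p.2 p.1) PySem.Dict.empty).getD p.2 0 == p.1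
         && PySem.Int.mod ((flat.foldl (fun d item => d.insert item (d.getD item 0 + 1)) PySem.Dict.empty).getD p.2 0) 2 == 1
      then some p.2 else none) = specSD flat := by
  induction flat using List.reverseRecOn with
  | nil => simp [PySem.List.enumerate, specSD, lastOrder]
  | append_singleton l x ih =>
    have henum : PySem.List.enumerate (l ++ [x]) = PySem.List.enumerate l ++ [((l.length : Int), x)] := by
      rw [PySem.List.enumerate_append]
      simp [PySem.List.enumerate_cons, PySem.List.enumerate_nil]
    have hlast : (PySem.List.enumerate l ++ [((l.length : Int), x)]).foldl (fun d p => d.insert p.2 p.1) PySem.Dict.empty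
        = ((PySem.List.enumerate l).foldl (fun d p => d.insert p.2 p.1) PySem.Dict.empty).insert x (l.length : Int) := by
      rw [List.foldl_append]
      simp
    have hcnt : ∀ y : Int, ((l ++ [x]).foldl (fun d item => d.insert item (d.getD item 0 + 1)) PySem.Dict.empty).getD y 0
        = (((l ++ [x]).count y : Nat) : Int) := by
      intro y
      simpa using PySem.Dict.getD_foldl_insert_add_one (l ++ [x]) PySem.Dict.empty y
    rw [henum, List.filterMap_append]
    simp only [hlast]
    -- the appended element (l.length, x): last[x] == l.length holds; kept iff new count odd
    have hlastx : (((PySem.List.enumerate l).foldl (fun d p => d.insert p.2 p.1) PySem.Dict.empty).insert x (l.length : Int)).getD x 0 = (l.length : Int) :=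
      PySem.Dict.getD_insert_self _ _ _ _
    have htail : List.filterMap (fun p =>
        if (((PySem.List.enumerate l).foldl (fun d p => d.insert p.2 p.1) PySem.Dict.empty).insert x (l.length : Int)).getD p.2 0 == p.1
           && PySem.Int.mod (((l ++ [x]).foldl (fun d item => d.insert item (d.getD item 0 + 1)) PySem.Dict.empty).getD p.2 0) 2 == 1
        then some p.2 else none) [((l.length : Int), x)]
        = (if l.count x % 2 = 0 then [x] else []) := by
      simp only [List.filterMap_cons, List.filterMap_nil]
      rw [hcnt x, hlastx]
      have hcx : (l ++ [x]).count x = l.count x + 1 := by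
        simp [List.count_append]
      rw [hcx, modCond]
      rcases Nat.mod_two_eq_zero_or_one (l.count x) with h | h <;>
        simp [Nat.add_mod, h]
    -- the elements of enumerate l: new condition = old condition filtered by ≠ x
    have hhead : List.filterMap (fun p =>
        if (((PySem.List.enumerate l).foldl (fun d p => d.insert p.2 p.1) PySem.Dict.empty).insert x (l.length : Int)).getD p.2 0 == p.1
           && PySem.Int.mod (((l ++ [x]).foldl (fun d item => d.insert item (d.getD item 0 + 1)) PySem.Dict.empty).getD p.2 0) 2 == 1
        then some p.2 else none) (PySem.List.enumerate l)
        = (specSD l).filter (fun y => y != x) := by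
      rw [← ih, List.filter_filterMap]
      apply List.filterMap_congr
      intro p hp
      obtain ⟨k, hk, rfl⟩ := (PySem.List.mem_enumerate_iff l 0 p).mp hp
      simp only [zero_add]
      by_cases hyx : l[k] = x
      · -- new last[x] = l.length ≠ k, so the new condition is false; the filter also drops x
        have h1 : ((((PySem.List.enumerate l).foldl (fun d p => d.insert p.2 p.1) PySem.Dict.empty).insert x (l.length : Int)).getD l[k] 0 == ((k : Nat) : Int)) = false := by
          rw [hyx, hlastx]
          simp only [beq_eq_false_iff_ne, ne_eq]
          intro h
          have : (k : Int) < (l.length : Int) := by exact_mod_cast hk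
          omega
        rw [h1]
        simp only [Bool.false_and, Bool.false_eq_true, if_false]
        split
        · simp [Option.filter, hyx]
        · rfl
      · have h1 : (((PySem.List.enumerate l).foldl (fun d p => d.insert p.2 p.1) PySem.Dict.empty).insert x (l.length : Int)).getD l[k] 0
            = ((PySem.List.enumerate l).foldl (fun d p => d.insert p.2 p.1) PySem.Dict.empty).getD l[k] 0 := by
          rw [PySem.Dict.getD_insert]
          simp [hyx]
        have hc2 : (l ++ [x]).count l[k] = l.count l[k] := by
          simp [List.count_append, Ne.symm hyx]
        have h2 : ((l ++ [x]).foldl (fun d item => d.insert item (d.getD item 0 + 1)) (PySem.Dict.empty : PySem.Dict Int Int)).getD l[k] 0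
            = (l.foldl (fun d item => d.insert item (d.getD item 0 + 1)) (PySem.Dict.empty : PySem.Dict Int Int)).getD l[k] 0 := by
          have e1 := PySem.Dict.getD_foldl_insert_add_one (l ++ [x]) PySem.Dict.empty l[k]
          have e2 := PySem.Dict.getD_foldl_insert_add_one l PySem.Dict.empty l[k]
          rw [hc2] at e1
          exact e1.trans e2.symm
        simp only [h1, h2]
        have hne : (l[k] != x) = true := by simpa using hyx
        split
        · simp [Option.filter, hne]
        · rfl
    rw [htail, hhead, specSD_append_singleton]

-- ===== VERDICT =====
theorem symmetric_difference_spec : Claim_equal_symmetric_difference := by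
  intro differList _
  unfold Spec_symmetric_difference symmetric_difference symmetric_difference_alt
  simp only []
  have hflat : differList.flatMap (fun lister => lister) = differList.flatten := by
    simp
  rw [hflat, bout_eq_specSD, ← List.foldl_flatten, foldl_sdStepA_eq_specSD]
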